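-- pv_equiv track=rewrite | github.com/cacaviana/carrossel | backend/factories/pipeline_factory.py | proxima_etapa
-- ===== SOURCE A (Python) =====
-- ETAPAS_PIPELINE = [
--     ("strategist", 1),
--     ("copywriter", 2),
--     ("hook_specialist", 3),
--     ("art_director", 4),
--     ("image_generator", 5),
--     ("brand_gate", 6),
--     ("content_critic", 7),
-- ]
--
-- def proxima_etapa(etapa_atual: str) -> str | None:
--     for agente, ordem in ETAPAS_PIPELINE:
--         if agente == etapa_atual:
--             for next_agente, next_ordem in ETAPAS_PIPELINE:
--                 if next_ordem == ordem + 1: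
--                     return next_agente
--             return None
--     return None
-- ===== SOURCE B (Python) =====
-- ETAPAS_PIPELINE = [
--     ("strategist", 1),
--     ("copywriter", 2),
--     ("hook_specialist", 3),
--     ("art_director", 4),
--     ("image_generator", 5),
--     ("brand_gate", 6),
--     ("content_critic", 7),
-- ]
--
-- _NAMES = [agente for agente, _ in ETAPAS_PIPELINE]
-- _SUCC = dict(zip(_NAMES, _NAMES[1:]))
--
-- def proxima_etapa(etapa_atual: str) -> str | None:
--     return _SUCC.get(etapa_atual)
-- ===== Notes on version B (the rewrite author's own statement) =====
-- stated objective: simpler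
-- what changed: Replaced A's outer scan plus inner re-scan for order+1 by a successor map built once from zip(names, names[1:]) with a single .get lookup.
import Mathlib
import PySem

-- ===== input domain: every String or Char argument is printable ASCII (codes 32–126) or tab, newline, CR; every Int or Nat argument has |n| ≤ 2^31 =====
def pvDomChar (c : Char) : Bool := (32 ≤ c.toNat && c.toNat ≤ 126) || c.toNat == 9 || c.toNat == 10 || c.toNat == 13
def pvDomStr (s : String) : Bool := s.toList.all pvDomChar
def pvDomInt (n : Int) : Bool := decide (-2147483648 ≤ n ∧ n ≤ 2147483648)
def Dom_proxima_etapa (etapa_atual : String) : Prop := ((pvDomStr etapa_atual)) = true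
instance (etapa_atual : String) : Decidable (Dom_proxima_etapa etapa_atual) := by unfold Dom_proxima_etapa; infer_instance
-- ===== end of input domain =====

-- B replaces A's nested scans by a successor map built once from the constant list (simpler: one table build + one lookup).

-- ===== PORT A =====
def ETAPAS_PIPELINE : List (String × Int) :=
  [("strategist", 1), ("copywriter", 2), ("hook_specialist", 3), ("art_director", 4),
   ("image_generator", 5), ("brand_gate", 6), ("content_critic", 7)]

-- inner loop of A: first agent whose ordem equals `alvo`
def pvInnerScan (alvo : Int) : List (String × Int) → Option String
  | [] => none
  | (next_agente, next_ordem) :: rest =>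
      if next_ordem == alvo then some next_agente else pvInnerScan alvo rest

-- outer loop of A
def pvOuterScan (etapa_atual : String) : List (String × Int) → Option String
  | [] => none
  | (agente, ordem) :: rest =>
      if agente == etapa_atual then pvInnerScan (ordem + 1) ETAPAS_PIPELINE
      else pvOuterScan etapa_atual rest

def proxima_etapa (etapa_atual : String) : Option String :=
  pvOuterScan etapa_atual ETAPAS_PIPELINE

-- ===== PORT B =====
def pvNames : List String := ETAPAS_PIPELINE.map Prod.fst

def pvSucc : PySem.Dict String String :=
  PySem.Dict.ofList (List.zip pvNames (pvNames.drop 1))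

def proxima_etapa_alt (etapa_atual : String) : Option String :=
  pvSucc.get? etapa_atual

-- ===== PRECONDITION & SPEC =====
def Spec_proxima_etapa (etapa_atual : String) (out : Option String) : Prop := out = proxima_etapa_alt etapa_atual
instance (etapa_atual : String) (out : Option String) : Decidable (Spec_proxima_etapa etapa_atual out) := by unfold Spec_proxima_etapa; infer_instance

-- ===== CLAIM (what is proved, stated in full; the proofs are below) =====
def Claim_equal_proxima_etapa : Prop := ∀ (etapa_atual : String), Dom_proxima_etapa etapa_atual → Spec_proxima_etapa etapa_atual (proxima_etapa etapa_atual)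

-- ===== LEMMAS AND PROOFS =====

-- ===== VERDICT (by name: the statement is the Claim_ definition above) =====
theorem proxima_etapa_spec : Claim_equal_proxima_etapa := by
  intro s _
  unfold Spec_proxima_etapa
  by_cases h1 : s = "strategist"; · subst h1; decide
  by_cases h2 : s = "copywriter"; · subst h2; decide
  by_cases h3 : s = "hook_specialist"; · subst h3; decide
  by_cases h4 : s = "art_director"; · subst h4; decide
  by_cases h5 : s = "image_generator"; · subst h5; decide
  by_cases h6 : s = "brand_gate"; · subst h6; decide
  by_cases h7 : s = "content_critic"; · subst h7; decide
  simp [proxima_etapa, proxima_etapa_alt, pvOuterScan, pvSucc, pvNames, ETAPAS_PIPELINE,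
        PySem.Dict.ofList, PySem.Dict.update, PySem.Dict.insert, PySem.Dict.empty,
        PySem.Dict.get?, PySem.Dict.contains,
        Ne.symm h1, Ne.symm h2, Ne.symm h3, Ne.symm h4, Ne.symm h5, Ne.symm h6, Ne.symm h7]
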